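-- pv_equiv track=rewrite | github.com/hghyhghy/Codechef-Coding-Ninja | Desktop/DSA/T82/minimumcost.py | minimum_cost_valid_string
-- ===== SOURCE A (Python) =====
-- def minimum_cost_valid_string(string:str)->int:
--
--     if len(string) % 2 != 0:
--
--         return -1
--
--     stack=[]
--
--     for char in string:
--
--         if char == "{":
--
--             stack.append(char)
--
--         else:
--
--             if stack and stack[-1]== "{":
--
--                 stack.pop()
--
--             else:
--
--                 stack.append(char)
--
--
--     open_bracket=close_bracket=0
--
--
--     while stack:
--
--         if stack.pop() == "{":
--
--             open_bracket += 1
--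
--         else:
--
--             close_bracket += 1
--
--
--     return (open_bracket+1)//2 + (close_bracket+1)//2
-- ===== SOURCE B (Python) =====
-- def minimum_cost_valid_string(string: str) -> int:
--     if len(string) % 2 != 0:
--         return -1
--     # Prefix-sum formulation: weight each char +1/-1; the number of unmatched
--     # closers is the negated minimum prefix balance, unmatched openers is the
--     # final balance plus that. No matching/cancellation is simulated.
--     bal = m = 0
--     for char in string:
--         bal += 1 if char == "{" else -1
--         m = min(m, bal)
--     close = -m
--     return (bal + close + 1) // 2 + (close + 1) // 2
-- ===== Notes on version B (the rewrite author's own statement) =====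
-- stated objective: alternative
-- what changed: Replaces the stack simulation and drain loop with an arithmetic prefix-sum computation: one pass tracks the running +1/-1 balance and its minimum; unmatched closers = -min prefix balance, unmatched openers = final balance + that, no matching or cancellation is simulated.
import Mathlib
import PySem

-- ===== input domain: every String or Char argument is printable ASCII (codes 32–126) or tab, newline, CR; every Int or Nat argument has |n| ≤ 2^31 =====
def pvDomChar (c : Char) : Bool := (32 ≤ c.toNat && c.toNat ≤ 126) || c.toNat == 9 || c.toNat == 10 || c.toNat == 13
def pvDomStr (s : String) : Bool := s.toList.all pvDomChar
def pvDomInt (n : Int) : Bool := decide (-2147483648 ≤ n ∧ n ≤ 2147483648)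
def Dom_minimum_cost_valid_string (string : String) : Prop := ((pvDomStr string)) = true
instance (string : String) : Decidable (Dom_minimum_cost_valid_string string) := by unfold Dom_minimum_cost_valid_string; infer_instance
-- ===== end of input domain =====

-- B replaces A's stack simulation and drain loop with a prefix-sum computation:
-- one pass tracks the running +1/-1 balance and its minimum (alternative decomposition, same cost).

-- ===== PORT A =====
-- push '{'; on any other char pop a top '{' if present, else push the char
def pvStepA (stack : List Char) (c : Char) : List Char :=
  if c = '{' then c :: stack
  else if stack.head? = some '{' then stack.tail
  else c :: stack

-- the while-drain loop: pop each element, counting '{' vs others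
def pvDrainA : List Char → Int → Int → Int × Int
  | [], o, cl => (o, cl)
  | c :: rest, o, cl =>
      if c = '{' then pvDrainA rest (o + 1) cl else pvDrainA rest o (cl + 1)

def minimum_cost_valid_string (string : String) : Int :=
  if (string.length : Int) % 2 ≠ 0 then -1
  else
    let stack := string.toList.foldl pvStepA []
    let oc := pvDrainA stack 0 0
    PySem.Int.floordiv (oc.1 + 1) 2 + PySem.Int.floordiv (oc.2 + 1) 2

-- ===== PORT B =====
-- state = (running balance, minimum prefix balance so far)
def pvStepB (p : Int × Int) (c : Char) : Int × Int :=
  let b := p.1 + (if c = '{' then 1 else -1)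
  (b, min p.2 b)

def minimum_cost_valid_string_alt (string : String) : Int :=
  if (string.length : Int) % 2 ≠ 0 then -1
  else
    let bm := string.toList.foldl pvStepB (0, 0)
    let close := -bm.2
    PySem.Int.floordiv (bm.1 + close + 1) 2 + PySem.Int.floordiv (close + 1) 2

-- ===== PRECONDITION & SPEC =====
def Spec_minimum_cost_valid_string (string : String) (out : Int) : Prop := out = minimum_cost_valid_string_alt string
instance (string : String) (out : Int) : Decidable (Spec_minimum_cost_valid_string string out) := by unfold Spec_minimum_cost_valid_string; infer_instance

-- ===== CLAIM (what is proved, stated in full; the proofs are below) =====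
def Claim_equal_minimum_cost_valid_string : Prop := ∀ (string : String), Dom_minimum_cost_valid_string string → Spec_minimum_cost_valid_string string (minimum_cost_valid_string string)

-- ===== LEMMAS AND PROOFS =====

-- draining a '{'-free list counts only closes
lemma pvDrain_free (cs : List Char) (a b : Int) (h : ∀ x ∈ cs, x ≠ '{') :
    pvDrainA cs a b = (a, b + cs.length) := by
  induction cs generalizing b with
  | nil => simp [pvDrainA]
  | cons c t ih =>
      have hc : c ≠ '{' := h c (by simp)
      simp only [pvDrainA, if_neg hc]
      rw [ih (b + 1) (fun x hx => h x (List.mem_cons_of_mem _ hx))]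
      simp only [Prod.mk.injEq, List.length_cons, true_and]
      push_cast; ring

-- drain of a stack of n opens above a '{'-free suffix counts exactly (n, length)
lemma pvDrain_spec (n : Nat) (cs : List Char) (a b : Int)
    (h : ∀ x ∈ cs, x ≠ '{') :
    pvDrainA (List.replicate n '{' ++ cs) a b = (a + n, b + cs.length) := by
  induction n generalizing a with
  | zero => simpa using pvDrain_free cs a b h
  | succ n ih =>
      simp only [List.replicate_succ, List.cons_append, pvDrainA, if_true]
      rw [ih]
      simp only [Prod.mk.injEq, and_true]
      push_cast; ring

-- loop invariant: with B's state (b, m), A's stack is (b - m) opens on top of a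
-- '{'-free list of length (-m)
lemma pvInv (l : List Char) (b m : Int) (cs : List Char)
    (hm0 : m ≤ 0) (hmb : m ≤ b) (hcl : cs.length = (-m).toNat) (hcs : ∀ x ∈ cs, x ≠ '{') :
    ∃ cs', (∀ x ∈ cs', x ≠ '{') ∧ (List.foldl pvStepB (b, m) l).2 ≤ 0 ∧
      (List.foldl pvStepB (b, m) l).2 ≤ (List.foldl pvStepB (b, m) l).1 ∧
      List.foldl pvStepA (List.replicate (b - m).toNat '{' ++ cs) l
        = List.replicate ((List.foldl pvStepB (b, m) l).1 - (List.foldl pvStepB (b, m) l).2).toNat '{' ++ cs' ∧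
      cs'.length = (-(List.foldl pvStepB (b, m) l).2).toNat := by
  induction l generalizing b m cs with
  | nil => exact ⟨cs, hcs, hm0, hmb, rfl, hcl⟩
  | cons c t ih =>
      by_cases hc : c = '{'
      · subst hc
        have h1 : pvStepA (List.replicate (b - m).toNat '{' ++ cs) '{'
            = List.replicate (b + 1 - m).toNat '{' ++ cs := by
          rw [show (b + 1 - m).toNat = (b - m).toNat + 1 by omega, List.replicate_succ]
          simp [pvStepA]
        have h2 : pvStepB (b, m) '{' = (b + 1, min m (b + 1)) := by simp [pvStepB]
        have hmin : min m (b + 1) = m := by omega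
        simp only [List.foldl_cons, h1, h2, hmin]
        exact ih (b + 1) m cs hm0 (by omega) hcl hcs
      · have h2 : pvStepB (b, m) c = (b - 1, min m (b - 1)) := by
          simp [pvStepB, hc, sub_eq_add_neg]
        by_cases hpos : m ≤ b - 1
        · have hmin : min m (b - 1) = m := by omega
          have hn : (b - m).toNat = (b - 1 - m).toNat + 1 := by omega
          have h1 : pvStepA (List.replicate (b - m).toNat '{' ++ cs) c
              = List.replicate (b - 1 - m).toNat '{' ++ cs := by
            rw [hn, List.replicate_succ]
            simp [pvStepA, hc]
          simp only [List.foldl_cons, h1, h2, hmin]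
          exact ih (b - 1) m cs hm0 hpos hcl hcs
        · have hbm : b = m := by omega
          subst hbm
          have hmin : min b (b - 1) = b - 1 := by omega
          have hhd : cs.head? ≠ some '{' := by
            cases cs with
            | nil => simp
            | cons x t' => have := hcs x (by simp); simp [this]
          have h1 : pvStepA (List.replicate (b - b).toNat '{' ++ cs) c = c :: cs := by
            simp only [sub_self, Int.toNat_zero, List.replicate, List.nil_append]
            simp [pvStepA, hc, hhd]
          simp only [List.foldl_cons, h1, h2, hmin]
          have hcs' : ∀ x ∈ c :: cs, x ≠ '{' := by
            intro x hx
            rcases List.mem_cons.mp hx with h | h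
            · simpa [h] using hc
            · exact hcs x h
          have := ih (b - 1) (b - 1) (c :: cs) (by omega) le_rfl
            (by simp [hcl]; omega) hcs'
          simpa using this

-- ===== VERDICT (by name: the statement is the Claim_ definition above) =====
theorem minimum_cost_valid_string_spec : Claim_equal_minimum_cost_valid_string := by
  intro s _
  unfold Spec_minimum_cost_valid_string minimum_cost_valid_string minimum_cost_valid_string_alt
  by_cases hp : (s.length : Int) % 2 ≠ 0
  · simp [hp]
  · simp only [hp, if_false]
    obtain ⟨cs', hcs', hm0, hmb, hstack, hlen⟩ :=
      pvInv s.toList 0 0 [] le_rfl le_rfl rfl (by simp)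
    simp only [sub_zero, Int.toNat_zero, List.replicate, List.nil_append] at hstack
    set p := List.foldl pvStepB (0, 0) s.toList with hp2
    rw [hstack, pvDrain_spec _ _ _ _ hcs', hlen]
    have h1 : (((p.1 - p.2).toNat : Int)) = p.1 - p.2 := Int.toNat_of_nonneg (by omega)
    have h2 : (((-p.2).toNat : Int)) = -p.2 := Int.toNat_of_nonneg (by omega)
    simp only [zero_add, h1, h2]
    ring_nf
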